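-- pv_equiv track=rewrite | github.com/JasonDai1219/CIS-5120-final-project | backend/app/ai_service.py | _apply_root_topics
-- ===== SOURCE A (Python) =====
-- from typing import Dict, List, Optional, Tuple
--
-- def _get_effective_parent(msg: dict) -> Optional[str]:
--     inferred = msg.get("inferredReplyToId")
--     if isinstance(inferred, str) and inferred:
--         return inferred
--     parent = msg.get("parentId")
--     if isinstance(parent, str) and parent:
--         return parent
--     return None
--
-- def _resolve_root(msg_id: str, by_id: Dict[str, dict]) -> str:
--     seen: set[str] = set()
--     current = msg_id
--     while current in by_id and current not in seen:
--         seen.add(current)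
--         parent = _get_effective_parent(by_id[current])
--         if not parent or parent not in by_id:
--             return current
--         current = parent
--     return current
--
-- def _apply_root_topics(enriched: List[dict]) -> List[dict]:
--     by_id = {m["id"]: m for m in enriched if "id" in m}
--     root_topic: Dict[str, str] = {}
--
--     for msg in enriched:
--         mid = msg.get("id")
--         if not isinstance(mid, str):
--             continue
--         root = _resolve_root(mid, by_id)
--         topic = by_id.get(root, {}).get("topic") or "other"
--         if not topic.strip() or topic == "unknown":
--             topic = "other"
--         root_topic[mid] = topic
--
--     for msg in enriched:
--         mid = msg.get("id")
--         if isinstance(mid, str) and mid in root_topic: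
--             msg["topic"] = root_topic[mid]
--
--     return enriched
-- ===== SOURCE B (Python) =====
-- from typing import Dict, List, Optional, Tuple
--
--
-- def _apply_root_topics(enriched: List[dict]) -> List[dict]:
--     by_id = {m["id"]: m for m in enriched if "id" in m}
--
--     # Effective valid parent per id, computed once.
--     parent: Dict[str, str] = {}
--     for mid, m in by_id.items():
--         p = m.get("inferredReplyToId")
--         if not (isinstance(p, str) and p):
--             p = m.get("parentId")
--         if isinstance(p, str) and p and p in by_id:
--             parent[mid] = p
--
--     # Memoized root resolution: each node's root is computed once; walks stop
--     # at already-resolved nodes and cache every node of the walked path.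
--     root: Dict[str, str] = {}
--     for start in by_id:
--         if start in root:
--             continue
--         path: List[str] = []
--         pos: Dict[str, int] = {}
--         cur = start
--         while True:
--             if cur in root:
--                 r = root[cur]
--                 for n in path:
--                     root[n] = r
--                 break
--             if cur in pos:
--                 j = pos[cur]
--                 for n in path[: j + 1]:
--                     root[n] = cur
--                 for n in path[j + 1:]:
--                     root[n] = n
--                 break
--             pos[cur] = len(path)
--             path.append(cur)
--             if cur in parent:
--                 cur = parent[cur]
--             else:
--                 for n in path:
--                     root[n] = cur
--                 break
--
--     topic_of: Dict[str, str] = {}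
--     for mid, r in root.items():
--         t = by_id[r].get("topic") or "other"
--         if not t.strip() or t == "unknown":
--             t = "other"
--         topic_of[mid] = t
--
--     for msg in enriched:
--         mid = msg.get("id")
--         if isinstance(mid, str) and mid in topic_of:
--             msg["topic"] = topic_of[mid]
--
--     return enriched
-- ===== Notes on version B (the rewrite author's own statement) =====
-- stated objective: alternative
-- what changed: B replaces A's per-message parent-chain walk (_resolve_root rerun from scratch for every message) with a single memoized resolution: a precomputed valid-parent map plus path-caching walks that stop at already-resolved ids and cache the whole walked path at once, detecting cycles with an in-path position map, so each id's root is computed once.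
import Mathlib
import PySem

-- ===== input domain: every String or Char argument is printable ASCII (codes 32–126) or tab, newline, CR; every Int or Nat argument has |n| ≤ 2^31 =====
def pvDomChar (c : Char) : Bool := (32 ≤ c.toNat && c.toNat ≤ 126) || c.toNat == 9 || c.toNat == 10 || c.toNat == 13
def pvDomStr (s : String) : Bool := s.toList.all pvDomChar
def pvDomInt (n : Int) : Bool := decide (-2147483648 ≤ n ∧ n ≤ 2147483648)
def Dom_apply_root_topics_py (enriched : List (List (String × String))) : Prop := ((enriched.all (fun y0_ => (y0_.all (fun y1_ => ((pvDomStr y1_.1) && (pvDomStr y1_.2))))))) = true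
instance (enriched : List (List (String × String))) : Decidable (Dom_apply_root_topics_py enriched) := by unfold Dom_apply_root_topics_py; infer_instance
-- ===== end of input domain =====

-- B replaces A's per-message root walk by a single memoized resolution: roots cached per node,
-- whole walked paths resolved at once, cycles detected via an in-path position map.
-- A mutates the message dicts in place; the equivalence proved here is about the RETURN value
-- (B's Python performs the same mutation).

-- ===== PORT A =====
-- helper for _get_effective_parent's parentId branch
def pvA_parentId (msg : PySem.Dict String String) : Option String :=
  match PySem.Dict.get? msg "parentId" with
  | some p => if p ≠ "" then some p else none
  | none => none

def pvA_effParent (msg : PySem.Dict String String) : Option String :=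
  match PySem.Dict.get? msg "inferredReplyToId" with
  | some s => if s ≠ "" then some s else pvA_parentId msg
  | none => pvA_parentId msg

-- _resolve_root's while loop; fuel |by_id| + 1 always suffices (seen grows by one known id each turn)
def pvA_resolveAux (by_id : PySem.Dict String (PySem.Dict String String)) :
    Nat → PySem.Set String → String → String
  | 0, _, current => current
  | fuel+1, seen, current =>
    if PySem.Dict.contains by_id current && !(PySem.Set.contains seen current) then
      let seen := PySem.Set.add seen current
      match pvA_effParent ((PySem.Dict.get? by_id current).getD (PySem.Dict.mk [])) with
      | none => current
      | some parent =>
        if PySem.Dict.contains by_id parent then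
          pvA_resolveAux by_id fuel seen parent
        else current
    else current

def pvA_resolveRoot (msg_id : String) (by_id : PySem.Dict String (PySem.Dict String String)) : String :=
  pvA_resolveAux by_id (PySem.Dict.size by_id + 1) PySem.Set.empty msg_id

def apply_root_topics_py (enriched : List (List (String × String))) : List (List (String × String)) :=
  let by_id : PySem.Dict String (PySem.Dict String String) :=
    enriched.foldl (fun d m =>
      if PySem.Dict.contains (PySem.Dict.mk m) "id" then
        PySem.Dict.insert d ((PySem.Dict.get? (PySem.Dict.mk m) "id").getD "") (PySem.Dict.mk m)
      else d) (PySem.Dict.mk [])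
  let root_topic : PySem.Dict String String :=
    enriched.foldl (fun rt m =>
      match PySem.Dict.get? (PySem.Dict.mk m) "id" with
      | none => rt
      | some mid =>
        let root := pvA_resolveRoot mid by_id
        let topic0 :=
          match PySem.Dict.get? ((PySem.Dict.get? by_id root).getD (PySem.Dict.mk [])) "topic" with
          | some t => if t ≠ "" then t else "other"
          | none => "other"
        let topic := if PySem.Str.strip topic0 = "" || topic0 = "unknown" then "other" else topic0
        PySem.Dict.insert rt mid topic) (PySem.Dict.mk [])
  enriched.map (fun m =>
    match PySem.Dict.get? (PySem.Dict.mk m) "id" with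
    | none => m
    | some mid =>
      match PySem.Dict.get? root_topic mid with
      | none => m
      | some t => (PySem.Dict.insert (PySem.Dict.mk m) "topic" t).items)

-- ===== PORT B =====
-- Source B: p = inferred; if not (str and p): p = parentId; keep only a nonempty p that is a known id
def pvB_validParent (by_id : PySem.Dict String (PySem.Dict String String))
    (m : PySem.Dict String String) : Option String :=
  let p :=
    match PySem.Dict.get? m "inferredReplyToId" with
    | some s => if s ≠ "" then some s else PySem.Dict.get? m "parentId"
    | none => PySem.Dict.get? m "parentId"
  match p with
  | some q => if q ≠ "" && PySem.Dict.contains by_id q then some q else none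
  | none => none

-- Source B's memoizing walk ('while True'); fuel |by_id| + 1 always suffices (path grows each turn);
-- path[:j+1] / path[j+1:] with these nonnegative in-range bounds are take/drop (PySem.List.slice_natCast)
def pvB_walkAux (parent : PySem.Dict String String) :
    Nat → PySem.Dict String String → List String → PySem.Dict String Nat → String →
    PySem.Dict String String
  | 0, root, _, _, _ => root
  | fuel+1, root, path, pos, cur =>
    match PySem.Dict.get? root cur with
    | some r => path.foldl (fun d n => PySem.Dict.insert d n r) root
    | none =>
      match PySem.Dict.get? pos cur with
      | some j =>
        let root1 := (path.take (j+1)).foldl (fun d n => PySem.Dict.insert d n cur) root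
        (path.drop (j+1)).foldl (fun d n => PySem.Dict.insert d n n) root1
      | none =>
        let pos := PySem.Dict.insert pos cur path.length
        let path := path ++ [cur]
        match PySem.Dict.get? parent cur with
        | some p => pvB_walkAux parent fuel root path pos p
        | none => path.foldl (fun d n => PySem.Dict.insert d n cur) root

def apply_root_topics_py_alt (enriched : List (List (String × String))) : List (List (String × String)) :=
  let by_id : PySem.Dict String (PySem.Dict String String) :=
    enriched.foldl (fun d m =>
      if PySem.Dict.contains (PySem.Dict.mk m) "id" then
        PySem.Dict.insert d ((PySem.Dict.get? (PySem.Dict.mk m) "id").getD "") (PySem.Dict.mk m)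
      else d) (PySem.Dict.mk [])
  let parent : PySem.Dict String String :=
    (PySem.Dict.items by_id).foldl (fun par p =>
      match pvB_validParent by_id p.2 with
      | some q => PySem.Dict.insert par p.1 q
      | none => par) (PySem.Dict.mk [])
  let root : PySem.Dict String String :=
    (PySem.Dict.keys by_id).foldl (fun root start =>
      match PySem.Dict.get? root start with
      | some _ => root
      | none => pvB_walkAux parent (PySem.Dict.size by_id + 1) root [] (PySem.Dict.mk []) start)
      (PySem.Dict.mk [])
  let topic_of : PySem.Dict String String :=
    (PySem.Dict.items root).foldl (fun tf p =>
      -- by_id[p.2] never raises (every stored root is a known id); ported via getD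
      let t0 :=
        match PySem.Dict.get? ((PySem.Dict.get? by_id p.2).getD (PySem.Dict.mk [])) "topic" with
        | some t => if t ≠ "" then t else "other"
        | none => "other"
      let t := if PySem.Str.strip t0 = "" || t0 = "unknown" then "other" else t0
      PySem.Dict.insert tf p.1 t) (PySem.Dict.mk [])
  enriched.map (fun m =>
    match PySem.Dict.get? (PySem.Dict.mk m) "id" with
    | none => m
    | some mid =>
      match PySem.Dict.get? topic_of mid with
      | none => m
      | some t => (PySem.Dict.insert (PySem.Dict.mk m) "topic" t).items)

-- ===== PRECONDITION & SPEC =====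
def Spec_apply_root_topics_py (enriched : List (List (String × String))) (out : List (List (String × String))) : Prop := out = apply_root_topics_py_alt enriched
instance (enriched : List (List (String × String))) (out : List (List (String × String))) : Decidable (Spec_apply_root_topics_py enriched out) := by unfold Spec_apply_root_topics_py; infer_instance

-- ===== CLAIM (what is proved, stated in full; the proofs are below) =====
def Claim_equal_apply_root_topics_py : Prop := ∀ (enriched : List (List (String × String))), Dom_apply_root_topics_py enriched → Spec_apply_root_topics_py enriched (apply_root_topics_py enriched)

-- ===== LEMMAS AND PROOFS =====

-- proof-side names for the two ports' internal values (definitionally the ports' lets)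
def pvById (enriched : List (List (String × String))) : PySem.Dict String (PySem.Dict String String) :=
  enriched.foldl (fun d m =>
    if PySem.Dict.contains (PySem.Dict.mk m) "id" then
      PySem.Dict.insert d ((PySem.Dict.get? (PySem.Dict.mk m) "id").getD "") (PySem.Dict.mk m)
    else d) (PySem.Dict.mk [])

def pvParentD (enriched : List (List (String × String))) : PySem.Dict String String :=
  (PySem.Dict.items (pvById enriched)).foldl (fun par p =>
    match pvB_validParent (pvById enriched) p.2 with
    | some q => PySem.Dict.insert par p.1 q
    | none => par) (PySem.Dict.mk [])

def pvRootD (enriched : List (List (String × String))) : PySem.Dict String String :=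
  (PySem.Dict.keys (pvById enriched)).foldl (fun root start =>
    match PySem.Dict.get? root start with
    | some _ => root
    | none => pvB_walkAux (pvParentD enriched) (PySem.Dict.size (pvById enriched) + 1) root []
        (PySem.Dict.mk []) start) (PySem.Dict.mk [])

def pvRT (enriched : List (List (String × String))) : PySem.Dict String String :=
  enriched.foldl (fun rt m =>
    match PySem.Dict.get? (PySem.Dict.mk m) "id" with
    | none => rt
    | some mid =>
      let root := pvA_resolveRoot mid (pvById enriched)
      let topic0 :=
        match PySem.Dict.get? ((PySem.Dict.get? (pvById enriched) root).getD (PySem.Dict.mk [])) "topic" with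
        | some t => if t ≠ "" then t else "other"
        | none => "other"
      let topic := if PySem.Str.strip topic0 = "" || topic0 = "unknown" then "other" else topic0
      PySem.Dict.insert rt mid topic) (PySem.Dict.mk [])

def pvTF (enriched : List (List (String × String))) : PySem.Dict String String :=
  (PySem.Dict.items (pvRootD enriched)).foldl (fun tf p =>
    let t0 :=
      match PySem.Dict.get? ((PySem.Dict.get? (pvById enriched) p.2).getD (PySem.Dict.mk [])) "topic" with
      | some t => if t ≠ "" then t else "other"
      | none => "other"
    let t := if PySem.Str.strip t0 = "" || t0 = "unknown" then "other" else t0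
    PySem.Dict.insert tf p.1 t) (PySem.Dict.mk [])

-- the one-step parent function both programs follow
def pvStep (d : PySem.Dict String (PySem.Dict String String)) (c : String) : Option String :=
  match PySem.Dict.get? d c with
  | some m => pvB_validParent d m
  | none => none

def pvIter (d : PySem.Dict String (PySem.Dict String String)) : Nat → String → Option String
  | 0, c => some c
  | n+1, c =>
    match pvStep d c with
    | some p => pvIter d n p
    | none => none

def pvReach (d : PySem.Dict String (PySem.Dict String String)) (c y : String) : Prop :=
  ∃ t, pvIter d t c = some y

def pvOnCycle (d : PySem.Dict String (PySem.Dict String String)) (c : String) : Prop :=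
  ∃ k, 0 < k ∧ pvIter d k c = some c

def pvMeas (d : PySem.Dict String (PySem.Dict String String)) (s : List String) : Nat :=
  ((PySem.Dict.keys d).filter (fun k => !(s.contains k))).length

-- the normalized topic A stores for a given id
def pvTopicA (d : PySem.Dict String (PySem.Dict String String)) (mid : String) : String :=
  let root := pvA_resolveRoot mid d
  let topic0 :=
    match PySem.Dict.get? ((PySem.Dict.get? d root).getD (PySem.Dict.mk [])) "topic" with
    | some t => if t ≠ "" then t else "other"
    | none => "other"
  if PySem.Str.strip topic0 = "" || topic0 = "unknown" then "other" else topic0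

-- invariant of B's memo table: sound w.r.t. A's resolution, step-closed, unique keys
def pvInv (d : PySem.Dict String (PySem.Dict String String)) (R : PySem.Dict String String) : Prop :=
  (∀ k v, PySem.Dict.get? R k = some v → v = pvA_resolveRoot k d) ∧
  (∀ k p, (PySem.Dict.get? R k).isSome → pvStep d k = some p → (PySem.Dict.get? R p).isSome) ∧
  (PySem.Dict.keys R).Nodup

theorem pv_valid_eq_eff (d : PySem.Dict String (PySem.Dict String String))
    (m : PySem.Dict String String) :
    pvB_validParent d m =
      (match pvA_effParent m with
       | some p => if PySem.Dict.contains d p then some p else none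
       | none => none) := by
  unfold pvB_validParent pvA_effParent pvA_parentId
  cases h1 : PySem.Dict.get? m "inferredReplyToId" <;>
    cases h2 : PySem.Dict.get? m "parentId" <;> simp <;> split_ifs <;> simp_all

theorem pv_resolveAux_succ (d : PySem.Dict String (PySem.Dict String String))
    (fuel : Nat) (seen : PySem.Set String) (c : String) :
    pvA_resolveAux d (fuel+1) seen c =
      if c ∈ seen then c else
        match pvStep d c with
        | none => c
        | some p => pvA_resolveAux d fuel (PySem.Set.add seen c) p := by
  simp only [pvA_resolveAux]
  rw [PySem.Dict.contains_eq_isSome_get?]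
  cases hg : PySem.Dict.get? d c with
  | none =>
    simp only [pvStep, hg, Option.isSome_none, Bool.false_and, if_false, Bool.false_eq_true]
    split <;> rfl
  | some m =>
    simp only [pvStep, hg, Option.isSome_some, Bool.true_and, Option.getD_some]
    rw [pv_valid_eq_eff]
    by_cases hm : c ∈ seen
    · rw [(PySem.Set.contains_iff seen c).mpr hm]
      simp [hm]
    · have hcs : PySem.Set.contains seen c = false := by
        cases hx : PySem.Set.contains seen c
        · rfl
        · exact absurd ((PySem.Set.contains_iff seen c).mp hx) hm
      rw [hcs, if_neg hm]
      cases he : pvA_effParent m with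
      | none => simp
      | some p =>
        cases hp : PySem.Dict.contains d p <;> simp [hp]

theorem pv_resolveAux_mem (d : PySem.Dict String (PySem.Dict String String))
    (fuel : Nat) (seen : PySem.Set String) (c : String) (h : c ∈ seen) :
    pvA_resolveAux d fuel seen c = c := by
  cases fuel with
  | zero => rfl
  | succ f => rw [pv_resolveAux_succ, if_pos h]

theorem pv_step_mem_keys (d : PySem.Dict String (PySem.Dict String String)) (c p : String)
    (h : pvStep d c = some p) : c ∈ PySem.Dict.keys d := by
  by_contra hc
  have hn := (PySem.Dict.get?_eq_none_iff_not_mem_keys d c).mpr hc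
  simp [pvStep, hn] at h

theorem pv_meas_zero (d : PySem.Dict String (PySem.Dict String String))
    (s : List String) (h : pvMeas d s = 0) (fuel : Nat) (c : String) :
    pvA_resolveAux d fuel s c = c := by
  induction fuel generalizing c with
  | zero => rfl
  | succ f ih =>
    rw [pv_resolveAux_succ]
    by_cases hm : c ∈ s
    · rw [if_pos hm]
    · rw [if_neg hm]
      cases hst : pvStep d c with
      | none => rfl
      | some p =>
        exfalso
        have hck := pv_step_mem_keys d c p hst
        have hmem : c ∈ (PySem.Dict.keys d).filter (fun k => !(s.contains k)) := by
          refine List.mem_filter.mpr ⟨hck, ?_⟩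
          simp [hm]
        rw [pvMeas, List.length_eq_zero_iff] at h
        rw [h] at hmem
        simp at hmem

theorem pv_meas_append_lt (d : PySem.Dict String (PySem.Dict String String))
    (s : List String) (c : String) (hc : c ∈ PySem.Dict.keys d) (hs : c ∉ s) :
    pvMeas d (s ++ [c]) < pvMeas d s := by
  unfold pvMeas
  have hcong : (PySem.Dict.keys d).filter (fun k => !((s ++ [c]).contains k)) =
      ((PySem.Dict.keys d).filter (fun k => !(s.contains k))).filter (fun k => !(k == c)) := by
    rw [List.filter_filter]
    apply List.filter_congr
    intro x _
    by_cases hxc : x = c <;> simp [List.contains_eq_mem, hxc]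
  rw [hcong]
  have hcmem : c ∈ (PySem.Dict.keys d).filter (fun k => !(s.contains k)) := by
    refine List.mem_filter.mpr ⟨hc, by simp [hs]⟩
  refine List.length_filter_lt_length_iff_exists.mpr ⟨c, hcmem, by simp⟩

theorem pv_resolveAux_fuel (d : PySem.Dict String (PySem.Dict String String)) :
    ∀ (f₁ f₂ : Nat) (s : PySem.Set String) (c : String), pvMeas d s ≤ f₁ → pvMeas d s ≤ f₂ →
      pvA_resolveAux d f₁ s c = pvA_resolveAux d f₂ s c := by
  intro f₁
  induction f₁ with
  | zero =>
    intro f₂ s c h1 h2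
    have h0 : pvMeas d s = 0 := Nat.le_zero.mp h1
    rw [pv_meas_zero d s h0, pv_meas_zero d s h0]
  | succ f ih =>
    intro f₂ s c h1 h2
    by_cases h0 : pvMeas d s = 0
    · rw [pv_meas_zero d s h0, pv_meas_zero d s h0]
    · cases f₂ with
      | zero => omega
      | succ g =>
        rw [pv_resolveAux_succ, pv_resolveAux_succ]
        by_cases hm : c ∈ s
        · rw [if_pos hm, if_pos hm]
        · rw [if_neg hm, if_neg hm]
          cases hst : pvStep d c with
          | none => rfl
          | some p =>
            have hck := pv_step_mem_keys d c p hst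
            have hlt : pvMeas d (PySem.Set.add s c) < pvMeas d s := by
              rw [PySem.Set.add_of_not_mem hm]
              exact pv_meas_append_lt d s c hck hm
            exact ih g (PySem.Set.add s c) p (by omega) (by omega)

theorem pv_resolveAux_drop (d : PySem.Dict String (PySem.Dict String String)) (x : String) :
    ∀ (fuel : Nat) (s₁ s₂ : PySem.Set String) (c : String),
      (∀ y, y ≠ x → (y ∈ s₁ ↔ y ∈ s₂)) → (∀ i, pvIter d i c ≠ some x) →
      pvA_resolveAux d fuel s₁ c = pvA_resolveAux d fuel s₂ c := by
  intro fuel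
  induction fuel with
  | zero => intro s₁ s₂ c _ _; rfl
  | succ f ih =>
    intro s₁ s₂ c hss hit
    rw [pv_resolveAux_succ, pv_resolveAux_succ]
    have hcx : c ≠ x := by
      intro e
      exact hit 0 (by simp [pvIter, e])
    have hmm : c ∈ s₁ ↔ c ∈ s₂ := hss c hcx
    by_cases hm : c ∈ s₁
    · rw [if_pos hm, if_pos (hmm.mp hm)]
    · rw [if_neg hm, if_neg (fun h => hm (hmm.mpr h))]
      cases hst : pvStep d c with
      | none => rfl
      | some p =>
        refine ih _ _ p ?_ ?_
        · intro y hy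
          rw [PySem.Set.mem_add, PySem.Set.mem_add]
          exact or_congr (hss y hy) Iff.rfl
        · intro i hip
          refine hit (i+1) ?_
          simp only [pvIter, hst]
          exact hip

theorem pv_iter_add (d : PySem.Dict String (PySem.Dict String String)) :
    ∀ (a b : Nat) (c : String), pvIter d (a + b) c =
      (match pvIter d a c with
       | some y => pvIter d b y
       | none => none) := by
  intro a
  induction a with
  | zero => intro b c; simp [pvIter]
  | succ a ih =>
    intro b c
    rw [Nat.succ_add]
    simp only [pvIter]
    cases hst : pvStep d c with
    | none => rfl
    | some p => exact ih b p

theorem pv_iter_isSome_of_le (d : PySem.Dict String (PySem.Dict String String))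
    {a b : Nat} {c : String} (h : b ≤ a) (ha : (pvIter d a c).isSome) :
    (pvIter d b c).isSome := by
  have := pv_iter_add d b (a - b) c
  rw [Nat.add_sub_cancel' h] at this
  cases hb : pvIter d b c with
  | none => rw [hb] at this; rw [this] at ha; exact ha
  | some y => simp

theorem pv_size_eq (d : PySem.Dict String (PySem.Dict String String)) :
    PySem.Dict.size d = (PySem.Dict.keys d).length := by
  simp [PySem.Dict.size, PySem.Dict.keys]

theorem pv_meas_nil (d : PySem.Dict String (PySem.Dict String String)) :
    pvMeas d [] = (PySem.Dict.keys d).length := by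
  simp [pvMeas]

theorem pv_resolve_none (d : PySem.Dict String (PySem.Dict String String)) (c : String)
    (h : pvStep d c = none) : pvA_resolveRoot c d = c := by
  unfold pvA_resolveRoot
  rw [pv_resolveAux_succ, if_neg (by simp [PySem.Set.empty]), h]

theorem pv_resolve_step (d : PySem.Dict String (PySem.Dict String String)) (c p : String)
    (h : pvStep d c = some p) (hnc : ¬ pvOnCycle d c) :
    pvA_resolveRoot c d = pvA_resolveRoot p d := by
  unfold pvA_resolveRoot
  rw [pv_resolveAux_succ, if_neg (by simp [PySem.Set.empty]), h]
  show pvA_resolveAux d (PySem.Dict.size d) (PySem.Set.add PySem.Set.empty c) p =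
    pvA_resolveAux d (PySem.Dict.size d + 1) PySem.Set.empty p
  have hdrop := pv_resolveAux_drop d c (PySem.Dict.size d)
    (PySem.Set.add PySem.Set.empty c) PySem.Set.empty p
    (by
      intro y hy
      rw [PySem.Set.mem_add]
      simp [hy])
    (by
      intro i hip
      refine hnc ⟨i+1, by omega, ?_⟩
      simp only [pvIter, h]
      exact hip)
  rw [hdrop]
  refine pv_resolveAux_fuel d (PySem.Dict.size d) (PySem.Dict.size d + 1) PySem.Set.empty p ?_ ?_
  · have : pvMeas d PySem.Set.empty = (PySem.Dict.keys d).length := pv_meas_nil d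
    rw [this, pv_size_eq]
  · have : pvMeas d PySem.Set.empty = (PySem.Dict.keys d).length := pv_meas_nil d
    rw [this, pv_size_eq]
    omega

theorem pv_resolve_cycle (d : PySem.Dict String (PySem.Dict String String)) (c : String)
    (h : pvOnCycle d c) : pvA_resolveRoot c d = c := by
  have hP : ∃ k, 0 < k ∧ pvIter d k c = some c := h
  obtain ⟨hm0, hmc⟩ := Nat.find_spec hP
  set m := Nat.find hP with hmdef
  have hminP : ∀ j, j < m → ¬ (0 < j ∧ pvIter d j c = some c) := fun j hj => Nat.find_min hP hj
  have hsome : ∀ t, t ≤ m → (pvIter d t c).isSome :=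
    fun t ht => pv_iter_isSome_of_le d ht (by rw [hmc]; rfl)
  have hdist : ∀ s t, s < t → t < m → ∀ y z, pvIter d s c = some y → pvIter d t c = some z → y ≠ z := by
    intro s t hst htm y z hy hz hyz
    have hsplit := pv_iter_add d t (m - t) c
    rw [Nat.add_sub_cancel' (by omega), hmc, hz] at hsplit
    -- hsplit : some c = pvIter d (m - t) z
    have hloop := pv_iter_add d s (m - t) c
    rw [hy, hyz] at hloop
    rw [← hsplit] at hloop
    exact hminP (s + (m - t)) (by omega) ⟨by omega, hloop⟩
  have hCYC : ∀ fuel t x (seen : PySem.Set String), t < m → pvIter d t c = some x →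
      (∀ y, y ∈ seen ↔ ∃ s, s < t ∧ pvIter d s c = some y) → m - t ≤ fuel →
      pvA_resolveAux d fuel seen x = c := by
    intro fuel
    induction fuel with
    | zero => intro t x seen ht _ _ hf; omega
    | succ f ih =>
      intro t x seen ht hx hseen hf
      rw [pv_resolveAux_succ]
      have hxnot : x ∉ seen := by
        intro hxm
        obtain ⟨s, hst, hs⟩ := (hseen x).mp hxm
        exact hdist s t hst ht x x hs hx rfl
      rw [if_neg hxnot]
      have hst1 := hsome (t+1) (by omega)
      obtain ⟨x', hx'⟩ := Option.isSome_iff_exists.mp hst1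
      have hstep : pvStep d x = some x' := by
        have hadd := pv_iter_add d t 1 c
        rw [hx, hx'] at hadd
        cases hs : pvStep d x with
        | none => simp [pvIter, hs] at hadd
        | some p =>
          simp [pvIter, hs] at hadd
          rw [hadd]
      rw [hstep]
      by_cases htm : t + 1 = m
      · have hxc : x' = c := by
          rw [htm, hmc] at hx'
          exact (Option.some_inj.mp hx').symm
        subst hxc
        refine pv_resolveAux_mem d f _ x' ?_
        rw [PySem.Set.mem_add]
        by_cases ht0 : t = 0
        · right
          subst ht0
          simpa [pvIter] using hx
        · left
          exact (hseen x').mpr ⟨0, by omega, rfl⟩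
      · refine ih (t+1) x' (PySem.Set.add seen x) (by omega) hx' ?_ (by omega)
        intro y
        rw [PySem.Set.mem_add]
        constructor
        · rintro (hy | rfl)
          · obtain ⟨sx, hsx, hsy⟩ := (hseen y).mp hy
            exact ⟨sx, by omega, hsy⟩
          · exact ⟨t, by omega, hx⟩
        · rintro ⟨sx, hsx, hsy⟩
          by_cases hst : sx < t
          · exact Or.inl ((hseen y).mpr ⟨sx, hst, hsy⟩)
          · have : sx = t := by omega
            subst this
            right
            rw [hx] at hsy
            exact (Option.some_inj.mp hsy).symm
  -- m is at most the number of known ids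
  have hcard : m ≤ (PySem.Dict.keys d).length := by
    classical
    set S : Finset String := (Finset.range m).image (fun t => (pvIter d t c).getD "") with hS
    have hinj : Set.InjOn (fun t => (pvIter d t c).getD "") (Finset.range m) := by
      intro a ha b hb hab
      simp only [Finset.coe_range, Set.mem_Iio] at ha hb
      by_contra hne
      rcases Nat.lt_or_ge a b with hlt | hge
      · obtain ⟨y, hy⟩ := Option.isSome_iff_exists.mp (hsome a (by omega))
        obtain ⟨z, hz⟩ := Option.isSome_iff_exists.mp (hsome b (by omega))
        exact hdist a b hlt hb y z hy hz (by simp [hy, hz] at hab; exact hab)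
      · have hlt : b < a := by omega
        obtain ⟨y, hy⟩ := Option.isSome_iff_exists.mp (hsome b (by omega))
        obtain ⟨z, hz⟩ := Option.isSome_iff_exists.mp (hsome a (by omega))
        exact hdist b a hlt ha y z hy hz (by simp [hy, hz] at hab; exact hab.symm)
    have hsub : S ⊆ (PySem.Dict.keys d).toFinset := by
      intro y hy
      rw [hS, Finset.mem_image] at hy
      obtain ⟨t, htr, hty⟩ := hy
      rw [Finset.mem_range] at htr
      obtain ⟨v, hv⟩ := Option.isSome_iff_exists.mp (hsome t (by omega))
      have hs1 := hsome (t+1) (by omega)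
      obtain ⟨w, hw⟩ := Option.isSome_iff_exists.mp hs1
      have hadd := pv_iter_add d t 1 c
      rw [hv, hw] at hadd
      have hstep : pvStep d v = some w := by
        cases hs : pvStep d v with
        | none => simp [pvIter, hs] at hadd
        | some p =>
          simp [pvIter, hs] at hadd
          rw [hadd]
      have : v ∈ PySem.Dict.keys d := pv_step_mem_keys d v w hstep
      rw [List.mem_toFinset]
      simp [hv] at hty
      rw [← hty]
      exact this
    have h1 : S.card = m := by
      rw [hS, Finset.card_image_of_injOn hinj, Finset.card_range]
    have h2 := Finset.card_le_card hsub
    have h3 := (PySem.Dict.keys d).toFinset_card_le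
    omega
  unfold pvA_resolveRoot
  refine hCYC (PySem.Dict.size d + 1) 0 c PySem.Set.empty (by omega) rfl ?_ ?_
  · intro y
    simp [PySem.Set.empty]
  · rw [pv_size_eq]
    omega

theorem pv_reach_back (d : PySem.Dict String (PySem.Dict String String)) {c y : String}
    (h : pvOnCycle d c) (hr : pvReach d c y) : pvReach d y c := by
  obtain ⟨k, hk0, hk⟩ := h
  obtain ⟨t, ht⟩ := hr
  have hcyc : ∀ n, pvIter d (n*k) c = some c := by
    intro n
    induction n with
    | zero => simp [pvIter]
    | succ n ihn =>
      rw [Nat.succ_mul, pv_iter_add, ihn]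
      exact hk
  refine ⟨t*k - t, ?_⟩
  have hsplit := pv_iter_add d t (t*k - t) c
  rw [Nat.add_sub_cancel' (Nat.le_mul_of_pos_right t hk0), ht, hcyc t] at hsplit
  exact hsplit.symm

theorem pv_onCycle_of_reach (d : PySem.Dict String (PySem.Dict String String)) {c y : String}
    (h : pvOnCycle d c) (hr : pvReach d c y) : pvOnCycle d y := by
  obtain ⟨s, hs⟩ := pv_reach_back d h hr
  obtain ⟨t, ht⟩ := hr
  by_cases h0 : s + t = 0
  · have ht0 : t = 0 := by omega
    subst ht0
    have : y = c := by simpa [pvIter] using ht.symm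
    rw [this]
    exact h
  · refine ⟨s + t, Nat.pos_of_ne_zero h0, ?_⟩
    rw [pv_iter_add, hs]
    exact ht

theorem pv_not_onCycle_of_none (d : PySem.Dict String (PySem.Dict String String)) {c : String}
    {T : Nat} (h : pvIter d T c = none) : ¬ pvOnCycle d c := by
  rintro ⟨k, hk0, hk⟩
  have hcyc : ∀ n, pvIter d (n*k) c = some c := by
    intro n
    induction n with
    | zero => simp [pvIter]
    | succ n ihn =>
      rw [Nat.succ_mul, pv_iter_add, ihn]
      exact hk
  have hs := pv_iter_isSome_of_le d (Nat.le_mul_of_pos_right T hk0)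
    (by rw [hcyc T]; rfl)
  rw [h] at hs
  simp at hs

theorem pv_resolve_reach (d : PySem.Dict String (PySem.Dict String String)) :
    ∀ (t : Nat) (x y : String), pvIter d t x = some y →
      (∀ s, s < t → ∀ z, pvIter d s x = some z → ¬ pvOnCycle d z) →
      pvA_resolveRoot x d = pvA_resolveRoot y d := by
  intro t
  induction t with
  | zero =>
    intro x y hxy _
    have : y = x := by simpa [pvIter] using hxy.symm
    rw [this]
  | succ t ih =>
    intro x y hxy hnc
    have hx0 : ¬ pvOnCycle d x := hnc 0 (by omega) x (by simp [pvIter])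
    cases hst : pvStep d x with
    | none => simp [pvIter, hst] at hxy
    | some p =>
      have hxy' : pvIter d t p = some y := by simpa [pvIter, hst] using hxy
      rw [pv_resolve_step d x p hst hx0]
      refine ih p y hxy' ?_
      intro s hs z hz
      refine hnc (s+1) (by omega) z ?_
      simp only [pvIter, hst]
      exact hz

theorem pv_get?_foldl_insert_fun (v : String → String) :
    ∀ (l : List String) (R : PySem.Dict String String) (x : String),
      PySem.Dict.get? (l.foldl (fun d n => PySem.Dict.insert d n (v n)) R) x =
        if x ∈ l then some (v x) else PySem.Dict.get? R x := by
  intro l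
  induction l with
  | nil => intro R x; simp
  | cons n l ih =>
    intro R x
    simp only [List.foldl_cons]
    rw [ih]
    by_cases hx : x ∈ l
    · simp [hx]
    · rw [PySem.Dict.get?_insert]
      rcases eq_or_ne x n with rfl | hxn
      · simp [hx]
      · simp [hxn, hx]

theorem pv_chain_iter (d : PySem.Dict String (PySem.Dict String String)) (L : List String)
    (h : List.IsChain (fun a b => pvStep d a = some b) L) :
    ∀ (i j : Nat) (hij : i ≤ j) (hj : j < L.length),
      pvIter d (j - i) (L[i]'(by omega)) = some (L[j]'hj) := by
  have key : ∀ k i (hik : i + k < L.length), pvIter d k (L[i]'(by omega)) = some (L[i+k]'(by omega)) := by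
    intro k
    induction k with
    | zero => intro i hi; simp [pvIter]
    | succ k ihk =>
      intro i hi
      have hstep : pvStep d (L[i]'(by omega)) = some (L[i+1]'(by omega)) :=
        (List.isChain_iff_getElem.mp h) i (by omega)
      have hpeel : pvIter d (k+1) (L[i]'(by omega)) = pvIter d k (L[i+1]'(by omega)) := by
        simp only [pvIter, hstep]
      rw [hpeel]
      have h2 := ihk (i+1) (by omega)
      convert h2 using 3
      omega
  intro i j hij hj
  obtain ⟨k, rfl⟩ := Nat.le.dest hij
  rw [show i + k - i = k from by omega]
  exact key k i hj

theorem pv_inv_reach_cached (d : PySem.Dict String (PySem.Dict String String))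
    (R : PySem.Dict String String) (hInv : pvInv d R) :
    ∀ (t : Nat) (c y : String), pvIter d t c = some y → (PySem.Dict.get? R c).isSome →
      (PySem.Dict.get? R y).isSome := by
  intro t
  induction t with
  | zero =>
    intro c y h hc
    have : y = c := by simpa [pvIter] using h.symm
    rw [this]
    exact hc
  | succ t ih =>
    intro c y hty hc
    cases hst : pvStep d c with
    | none => simp [pvIter, hst] at hty
    | some p =>
      have hty' : pvIter d t p = some y := by simpa [pvIter, hst] using hty
      exact ih p y hty' (hInv.2.1 c p hc hst)

theorem pv_idxOf_append (l : List String) (a x : String) (ha : a ∉ l) :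
    (l ++ [a]).idxOf? x = if x = a then some l.length else l.idxOf? x := by
  induction l with
  | nil =>
    simp only [List.nil_append, List.idxOf?_cons, List.idxOf?_nil, List.length_nil]
    by_cases h : x = a <;> simp [h, eq_comm (a := a)]
  | cons b l ih =>
    have hal : a ∉ l := fun h => ha (List.mem_cons_of_mem _ h)
    simp only [List.cons_append, List.idxOf?_cons]
    rw [ih hal]
    by_cases hba : b == x
    · have hbx : b = x := by simpa using hba
      have hxa : ¬ x = a := fun e => ha (by rw [← hbx] at e; rw [e]; exact List.mem_cons_self)
      simp [hba, hxa]
    · by_cases hxa : x = a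
      · simp [hxa]
        exact fun e => ha (by rw [e]; exact List.mem_cons_self)
      · simp [hba, hxa]

theorem pv_dict_get?_eq_find? {ν : Type} (l : List (String × ν)) (c : String) :
    PySem.Dict.get? (PySem.Dict.mk l) c = (l.find? (fun p => p.1 == c)).map Prod.snd := by
  induction l with
  | nil => rfl
  | cons p l ih =>
    obtain ⟨k, v⟩ := p
    rw [PySem.Dict.get?_mk_cons]
    cases hk : (k == c) <;> simp [List.find?, hk, ih]

theorem pv_parent_fold_skip (d : PySem.Dict String (PySem.Dict String String)) :
    ∀ (l : List (String × PySem.Dict String String)) (acc : PySem.Dict String String) (c : String),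
      c ∉ l.map Prod.fst →
      PySem.Dict.get? (l.foldl (fun par p =>
        match pvB_validParent d p.2 with
        | some q => PySem.Dict.insert par p.1 q
        | none => par) acc) c = PySem.Dict.get? acc c := by
  intro l
  induction l with
  | nil => intro acc c _; rfl
  | cons p l ih =>
    intro acc c hc
    simp only [List.map_cons, List.mem_cons, not_or] at hc
    simp only [List.foldl_cons]
    rw [ih _ c hc.2]
    cases hv : pvB_validParent d p.2 with
    | none => rfl
    | some q => rw [PySem.Dict.get?_insert, if_neg hc.1]

theorem pv_parent_fold_get (d : PySem.Dict String (PySem.Dict String String)) :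
    ∀ (l : List (String × PySem.Dict String String)) (acc : PySem.Dict String String) (c : String),
      (l.map Prod.fst).Nodup → (∀ p ∈ l, PySem.Dict.get? acc p.1 = none) →
      PySem.Dict.get? (l.foldl (fun par p =>
        match pvB_validParent d p.2 with
        | some q => PySem.Dict.insert par p.1 q
        | none => par) acc) c =
        (match l.find? (fun p => p.1 == c) with
         | some p => pvB_validParent d p.2
         | none => PySem.Dict.get? acc c) := by
  intro l
  induction l with
  | nil => intro acc c _ _; rfl
  | cons p l ih =>
    intro acc c hnd hacc
    simp only [List.map_cons, List.nodup_cons] at hnd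
    simp only [List.foldl_cons]
    by_cases hpc : p.1 = c
    · subst hpc
      have hfind : (p :: l).find? (fun q => q.1 == p.1) = some p := by
        simp [List.find?]
      rw [hfind, pv_parent_fold_skip d l _ p.1 hnd.1]
      show _ = pvB_validParent d p.2
      cases hv : pvB_validParent d p.2 with
      | none => exact hacc p List.mem_cons_self
      | some q => exact PySem.Dict.get?_insert_self _ _ _
    · have hbeq : (p.1 == c) = false := by simpa using hpc
      have hfind : (p :: l).find? (fun q => q.1 == c) = l.find? (fun q => q.1 == c) := by
        simp [List.find?, hbeq]
      rw [hfind]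
      have hacc' : ∀ q ∈ l, PySem.Dict.get? (match pvB_validParent d p.2 with
          | some q' => PySem.Dict.insert acc p.1 q'
          | none => acc) q.1 = none := by
        intro q hq
        have hne : q.1 ≠ p.1 := by
          intro e
          exact hnd.1 (e ▸ List.mem_map_of_mem hq)
        cases hv : pvB_validParent d p.2 with
        | none => exact hacc q (List.mem_cons_of_mem _ hq)
        | some q' =>
          rw [PySem.Dict.get?_insert, if_neg hne]
          exact hacc q (List.mem_cons_of_mem _ hq)
      rw [ih _ c hnd.2 hacc']
      cases hf : l.find? (fun q => q.1 == c) with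
      | some q => rfl
      | none =>
        cases hv : pvB_validParent d p.2 with
        | none => rfl
        | some q' => rw [PySem.Dict.get?_insert, if_neg (fun e => hpc e.symm)]

-- the parent dict B builds looks up exactly pvStep
theorem pv_parent_get? (d : PySem.Dict String (PySem.Dict String String))
    (hnd : (PySem.Dict.keys d).Nodup) (c : String) :
    PySem.Dict.get? ((PySem.Dict.items d).foldl (fun par p =>
      match pvB_validParent d p.2 with
      | some q => PySem.Dict.insert par p.1 q
      | none => par) (PySem.Dict.mk [])) c = pvStep d c := by
  rw [pv_parent_fold_get d (PySem.Dict.items d) (PySem.Dict.mk []) c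
    (by simpa [PySem.Dict.keys] using hnd)
    (by intro p _; rfl)]
  have hg : PySem.Dict.get? d c =
      (((PySem.Dict.items d).find? (fun p => p.1 == c)).map Prod.snd) :=
    pv_dict_get?_eq_find? (PySem.Dict.items d) c
  rw [pvStep, hg]
  cases hf : (PySem.Dict.items d).find? (fun p => p.1 == c) with
  | none => rfl
  | some p => rfl

-- B's walk: preserves the invariant, grows the table monotonically, and caches the whole path
theorem pv_walk_spec (d : PySem.Dict String (PySem.Dict String String))
    (parentD : PySem.Dict String String) (hpar : ∀ c, PySem.Dict.get? parentD c = pvStep d c) :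
    ∀ (fuel : Nat) (R : PySem.Dict String String) (path : List String)
      (pos : PySem.Dict String Nat) (cur : String),
      pvInv d R →
      (∀ x, PySem.Dict.get? pos x = path.idxOf? x) →
      List.IsChain (fun a b => pvStep d a = some b) (path ++ [cur]) →
      path.Nodup →
      (∀ x ∈ path, PySem.Dict.get? R x = none) →
      pvMeas d path + 1 ≤ fuel →
      pvInv d (pvB_walkAux parentD fuel R path pos cur) ∧
      (∀ x, (PySem.Dict.get? R x).isSome →
        (PySem.Dict.get? (pvB_walkAux parentD fuel R path pos cur) x).isSome) ∧
      (∀ x ∈ path ++ [cur], (PySem.Dict.get? (pvB_walkAux parentD fuel R path pos cur) x).isSome) := by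
  intro fuel
  induction fuel with
  | zero => intro R path pos cur _ _ _ _ _ hfuel; omega
  | succ f ih =>
    intro R path pos cur hInv hpos hchain hnd hunc hfuel
    obtain ⟨hI1, hI2, hI3⟩ := hInv
    have hchainE := List.isChain_iff_getElem.mp hchain
    have hLget : ∀ (t : Nat) (h : t < path.length), (path ++ [cur])[t]'(by simp; omega) = path[t]'h :=
      fun t h => List.getElem_append_left h
    have hLlast : (path ++ [cur])[path.length]'(by simp) = cur := by
      rw [List.getElem_append_right (le_refl _)]
      simp
    have hreach : ∀ (t : Nat) (h : t < path.length),
        pvIter d (path.length - t) (path[t]'h) = some cur := by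
      intro t h
      have hc := pv_chain_iter d (path ++ [cur]) hchain t path.length (by omega) (by simp)
      rw [hLget t h, hLlast] at hc
      exact hc
    have hzidx : ∀ (t s : Nat) (h : t < path.length) (hs : t + s < path.length) (z : String),
        pvIter d s (path[t]'h) = some z → z = path[t+s]'hs := by
      intro t s h hs z hz
      have hc := pv_chain_iter d (path ++ [cur]) hchain t (t+s) (by omega) (by simp; omega)
      rw [show t + s - t = s from by omega, hLget t h, hLget (t+s) hs, hz] at hc
      exact Option.some_inj.mp hc
    simp only [pvB_walkAux]
    cases hcached : PySem.Dict.get? R cur with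
    | some r =>
      have hget : ∀ x, PySem.Dict.get? (path.foldl (fun dd n => PySem.Dict.insert dd n r) R) x
          = if x ∈ path then some r else PySem.Dict.get? R x :=
        fun x => pv_get?_foldl_insert_fun (fun _ => r) path R x
      have hrr : r = pvA_resolveRoot cur d := hI1 cur r hcached
      have hres : ∀ (t : Nat) (ht : t < path.length),
          pvA_resolveRoot (path[t]'ht) d = pvA_resolveRoot cur d := by
        intro t ht
        refine pv_resolve_reach d (path.length - t) _ _ (hreach t ht) ?_
        intro s hs z hz
        have hzz := hzidx t s ht (by omega) z hz
        rintro hcyc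
        have hrz : pvReach d z cur :=
          ⟨path.length - (t+s), by rw [hzz]; exact hreach (t+s) (by omega)⟩
        obtain ⟨u, hu⟩ := pv_reach_back d hcyc hrz
        have hcz := pv_inv_reach_cached d R ⟨hI1, hI2, hI3⟩ u cur z hu (by rw [hcached]; rfl)
        rw [hunc z (by rw [hzz]; exact List.getElem_mem _)] at hcz
        simp at hcz
      refine ⟨⟨?_, ?_, ?_⟩, ?_, ?_⟩
      · intro k v hv
        rw [hget k] at hv
        split_ifs at hv with hk
        · have hv' : v = r := (Option.some_inj.mp hv).symm
          obtain ⟨t, ht, rfl⟩ := List.mem_iff_getElem.mp hk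
          rw [hv', hrr]
          exact (hres t ht).symm
        · exact hI1 k v hv
      · intro k p hk hstep
        rw [hget p]
        rw [hget k] at hk
        split_ifs at hk with hkp
        · obtain ⟨t, ht, rfl⟩ := List.mem_iff_getElem.mp hkp
          have hnext := hchainE t (by simp; omega)
          rw [hLget t ht, hstep] at hnext
          have hpmem : p ∈ path ∨ p = cur := by
            have hmem := (Option.some_inj.mp hnext) ▸ List.getElem_mem (l := path ++ [cur]) (by simp; omega)
            rcases List.mem_append.mp hmem with hmm | hmm
            · exact Or.inl hmm
            · exact Or.inr (by simpa using hmm)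
          rcases hpmem with hmm | rfl
          · rw [if_pos hmm]; rfl
          · split_ifs
            · rfl
            · rw [hcached]; rfl
        · have hold := hI2 k p hk hstep
          split_ifs with hp
          · rfl
          · exact hold
      · exact PySem.Dict.nodup_keys_foldl_insert path (fun _ _ => r) R hI3
      · intro x hx
        rw [hget x]
        split_ifs
        · rfl
        · exact hx
      · intro x hx
        rw [hget x]
        rcases List.mem_append.mp hx with h | h
        · rw [if_pos h]; rfl
        · have : x = cur := by simpa using h
          subst this
          split_ifs
          · rfl
          · rw [hcached]; rfl
    | none =>
      cases hposc : PySem.Dict.get? pos cur with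
      | some j =>
        have hidx : path.idxOf? cur = some j := by rw [← hpos cur]; exact hposc
        obtain ⟨hjlen, hjval, -⟩ := List.idxOf?_eq_some_iff.mp hidx
        have honcyc : pvOnCycle d cur := by
          refine ⟨path.length - j, by omega, ?_⟩
          have hr := hreach j hjlen
          rw [hjval] at hr
          exact hr
        have hrescur : pvA_resolveRoot cur d = cur := pv_resolve_cycle d cur honcyc
        have hiterj : ∀ (t : Nat) (ht : t ≤ j), pvIter d (j - t) (path[t]'(by omega)) = some cur := by
          intro t ht
          rcases Nat.eq_or_lt_of_le ht with rfl | hlt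
          · simp only [Nat.sub_self]
            rw [show path[t]'(by omega) = cur from hjval]
            rfl
          · have hc := pv_chain_iter d (path ++ [cur]) hchain t j (by omega) (by simp; omega)
            rw [hLget t (by omega), hLget j hjlen, hjval] at hc
            exact hc
        have hseg : ∀ (s : Nat) (w : String), pvIter d s cur = some w →
            ∃ (u : Nat) (hu : u < path.length), j ≤ u ∧ w = path[u]'hu := by
          intro s
          induction s with
          | zero =>
            intro w hw
            exact ⟨j, hjlen, le_refl j, by rw [hjval]; exact (Option.some_inj.mp hw).symm⟩
          | succ s ihs =>
            intro w2 hw2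
            rw [pv_iter_add d s 1 cur] at hw2
            cases hw : pvIter d s cur with
            | none => rw [hw] at hw2; cases hw2
            | some w =>
              rw [hw] at hw2
              obtain ⟨u, hu, hju, rfl⟩ := ihs w hw
              have hstepw : pvStep d (path[u]'hu) = some w2 := by
                cases hs2 : pvStep d (path[u]'hu) with
                | none => simp [pvIter, hs2] at hw2
                | some q =>
                  simp [pvIter, hs2] at hw2
                  rw [hw2]
              have hnext := hchainE u (by simp; omega)
              rw [hLget u hu, hstepw] at hnext
              have hw3 := Option.some_inj.mp hnext
              by_cases hu1 : u + 1 < path.length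
              · exact ⟨u+1, hu1, by omega, by rw [hw3, hLget (u+1) hu1]⟩
              · refine ⟨j, hjlen, le_refl j, ?_⟩
                rw [hw3, List.getElem_append_right (by omega)]
                simp only [show u + 1 - path.length = 0 from by omega]
                simp only [List.getElem_cons_zero]
                exact hjval.symm
        have hresle : ∀ (t : Nat) (ht : t ≤ j), pvA_resolveRoot (path[t]'(by omega)) d = cur := by
          intro t ht
          have h1 := pv_resolve_reach d (j - t) _ cur (hiterj t ht) ?_
          · rw [h1, hrescur]
          · intro s hs z hz
            rintro hcyc
            have hzz := hzidx t s (by omega) (by omega) z hz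
            have hrz : pvReach d z cur := ⟨j - (t+s), by rw [hzz]; exact hiterj (t+s) (by omega)⟩
            obtain ⟨u, hu⟩ := pv_reach_back d hcyc hrz
            obtain ⟨u2, hu2, hju2, hzz2⟩ := hseg u z hu
            rw [hzz] at hzz2
            have := (hnd.getElem_inj_iff).mp hzz2
            omega
        have hresgt : ∀ (t : Nat) (ht : t < path.length), j < t →
            pvA_resolveRoot (path[t]'ht) d = path[t]'ht := by
          intro t ht hjt
          have hrt : pvReach d cur (path[t]'ht) := by
            refine ⟨t - j, ?_⟩
            have hc := pv_chain_iter d (path ++ [cur]) hchain j t (by omega) (by simp; omega)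
            rw [hLget j hjlen, hLget t ht, hjval] at hc
            exact hc
          exact pv_resolve_cycle d _ (pv_onCycle_of_reach d honcyc hrt)
        have hget1 : ∀ x, PySem.Dict.get?
            ((path.take (j+1)).foldl (fun dd n => PySem.Dict.insert dd n cur) R) x
            = if x ∈ path.take (j+1) then some cur else PySem.Dict.get? R x :=
          fun x => pv_get?_foldl_insert_fun (fun _ => cur) _ R x
        have hget : ∀ x, PySem.Dict.get? ((path.drop (j+1)).foldl
              (fun dd n => PySem.Dict.insert dd n n)
              ((path.take (j+1)).foldl (fun dd n => PySem.Dict.insert dd n cur) R)) x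
            = if x ∈ path.drop (j+1) then some x
              else if x ∈ path.take (j+1) then some cur else PySem.Dict.get? R x := by
          intro x
          rw [pv_get?_foldl_insert_fun (fun n => n) (path.drop (j+1)) _ x, hget1 x]
        have hmem_take : ∀ x, x ∈ path.take (j+1) ↔
            ∃ (t : Nat) (ht : t < path.length), t ≤ j ∧ x = path[t]'ht := by
          intro x
          rw [List.mem_iff_getElem]
          constructor
          · rintro ⟨i, hi, rfl⟩
            have hlen : i < j + 1 := by
              have := hi
              simp [List.length_take] at this
              omega
            exact ⟨i, by omega, by omega, by rw [List.getElem_take]⟩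
          · rintro ⟨t, ht, htj, rfl⟩
            refine ⟨t, by simp [List.length_take]; omega, ?_⟩
            rw [List.getElem_take]
        have hmem_drop : ∀ x, x ∈ path.drop (j+1) ↔
            ∃ (t : Nat) (ht : t < path.length), j < t ∧ x = path[t]'ht := by
          intro x
          rw [List.mem_iff_getElem]
          constructor
          · rintro ⟨i, hi, rfl⟩
            have hlen : j + 1 + i < path.length := by
              have := hi
              simp [List.length_drop] at this
              omega
            exact ⟨j + 1 + i, by omega, by omega, by rw [List.getElem_drop]⟩
          · rintro ⟨t, ht, htj, rfl⟩
            refine ⟨t - (j+1), by simp [List.length_drop]; omega, ?_⟩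
            rw [List.getElem_drop]
            congr 1
            omega
        have hsplit : path.take (j+1) ++ path.drop (j+1) = path := List.take_append_drop _ _
        have hmem_path : ∀ x, x ∈ path → x ∈ path.take (j+1) ∨ x ∈ path.drop (j+1) := by
          intro x hx
          rw [← hsplit] at hx
          exact List.mem_append.mp hx
        have hcur_take : cur ∈ path.take (j+1) :=
          (hmem_take cur).mpr ⟨j, hjlen, le_refl j, hjval.symm⟩
        refine ⟨⟨?_, ?_, ?_⟩, ?_, ?_⟩
        · intro k v hv
          rw [hget k] at hv
          split_ifs at hv with h1 h2
          · have hv' : v = k := (Option.some_inj.mp hv).symm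
            obtain ⟨t, ht, hjt, rfl⟩ := (hmem_drop k).mp h1
            rw [hv']
            exact (hresgt t ht hjt).symm
          · have hv' : v = cur := (Option.some_inj.mp hv).symm
            obtain ⟨t, ht, htj, rfl⟩ := (hmem_take k).mp h2
            rw [hv']
            exact (hresle t htj).symm
          · exact hI1 k v hv
        · intro k p hk hstep
          rw [hget p]
          rw [hget k] at hk
          have hpath_some : ∀ y, y ∈ path →
              (if y ∈ path.drop (j+1) then some y
               else if y ∈ path.take (j+1) then some cur else PySem.Dict.get? R y).isSome := by
            intro y hy
            rcases hmem_path y hy with h | h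
            · rw [if_neg, if_pos h]
              · rfl
              · intro hcon
                obtain ⟨t1, ht1, hj1, he1⟩ := (hmem_take y).mp h
                obtain ⟨t2, ht2, hj2, he2⟩ := (hmem_drop y).mp hcon
                rw [he1] at he2
                have := (hnd.getElem_inj_iff).mp he2
                omega
            · rw [if_pos h]; rfl
          have hksrc : k ∈ path ∨ (PySem.Dict.get? R k).isSome := by
            by_cases h1 : k ∈ path.drop (j+1)
            · exact Or.inl (by rw [← hsplit]; exact List.mem_append.mpr (Or.inr h1))
            · by_cases h2 : k ∈ path.take (j+1)
              · exact Or.inl (by rw [← hsplit]; exact List.mem_append.mpr (Or.inl h2))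
              · rw [if_neg h1, if_neg h2] at hk
                exact Or.inr hk
          rcases hksrc with hkp | hkold
          · obtain ⟨t, ht, rfl⟩ := List.mem_iff_getElem.mp hkp
            have hnext := hchainE t (by simp; omega)
            rw [hLget t ht, hstep] at hnext
            have hpmem : p ∈ path := by
              have hmem := (Option.some_inj.mp hnext) ▸ List.getElem_mem (l := path ++ [cur]) (by simp; omega)
              rcases List.mem_append.mp hmem with hmm | hmm
              · exact hmm
              · have : p = cur := by simpa using hmm
                rw [this, ← hjval]
                exact List.getElem_mem _
            exact hpath_some p hpmem
          · have hold := hI2 k p hkold hstep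
            split_ifs with h1 h2
            · rfl
            · rfl
            · exact hold
        · exact PySem.Dict.nodup_keys_foldl_insert _ (fun _ n => n) _
            (PySem.Dict.nodup_keys_foldl_insert _ (fun _ _ => cur) R hI3)
        · intro x hx
          rw [hget x]
          split_ifs
          · rfl
          · rfl
          · exact hx
        · intro x hx
          rw [hget x]
          have hxp : x ∈ path := by
            rcases List.mem_append.mp hx with h | h
            · exact h
            · have : x = cur := by simpa using h
              rw [this, ← hjval]
              exact List.getElem_mem _
          rcases hmem_path x hxp with h | h
          · by_cases h1 : x ∈ path.drop (j+1)
            · rw [if_pos h1]; rfl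
            · rw [if_neg h1, if_pos h]; rfl
          · rw [if_pos h]; rfl
      | none =>
        have hcurnot : cur ∉ path := List.idxOf?_eq_none_iff.mp (by rw [← hpos cur]; exact hposc)
        rw [hpar cur]
        cases hstepc : pvStep d cur with
        | some p =>
          have hcg : cur ∈ PySem.Dict.keys d := pv_step_mem_keys d cur p hstepc
          have hnd' : (path ++ [cur]).Nodup := by
            refine List.Nodup.append hnd (List.nodup_singleton cur) ?_
            intro a ha hb
            have : a = cur := by simpa using hb
            rw [this] at ha
            exact hcurnot ha
          have hpos' : ∀ x, PySem.Dict.get? (PySem.Dict.insert pos cur path.length) x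
              = (path ++ [cur]).idxOf? x := by
            intro x
            rw [PySem.Dict.get?_insert, pv_idxOf_append path cur x hcurnot]
            by_cases hx : x = cur
            · simp [hx]
            · simp [hx, hpos x]
          have hchain' : List.IsChain (fun a b => pvStep d a = some b) ((path ++ [cur]) ++ [p]) := by
            rw [List.isChain_iff_getElem]
            intro i hi
            have hlen2 : ((path ++ [cur]) ++ [p]).length = path.length + 2 := by simp
            by_cases hiL : i + 1 < (path ++ [cur]).length
            · rw [List.getElem_append_left (by omega), List.getElem_append_left hiL]
              exact hchainE i hiL
            · have hieq : i = path.length := by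
                simp at hiL hi ⊢
                omega
              subst hieq
              have e1 : ((path ++ [cur]) ++ [p])[path.length]'(by simp) = cur := by
                rw [List.getElem_append_left (as := path ++ [cur]) (by simp)]
                exact hLlast
              have e2 : ((path ++ [cur]) ++ [p])[path.length + 1]'(by simp) = p := by
                rw [List.getElem_append_right (as := path ++ [cur]) (by simp)]
                simp
              rw [e1, e2]
              exact hstepc
          have huncached' : ∀ x ∈ path ++ [cur], PySem.Dict.get? R x = none := by
            intro x hx
            rcases List.mem_append.mp hx with h | h
            · exact hunc x h
            · have : x = cur := by simpa using h
              rw [this]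
              exact hcached
          have hfuel' : pvMeas d (path ++ [cur]) + 1 ≤ f := by
            have := pv_meas_append_lt d path cur hcg hcurnot
            omega
          obtain ⟨a, b, c⟩ := ih R (path ++ [cur]) (PySem.Dict.insert pos cur path.length) p
            ⟨hI1, hI2, hI3⟩ hpos' hchain' hnd' huncached' hfuel'
          refine ⟨a, b, ?_⟩
          intro x hx
          exact c x (List.mem_append_left _ hx)
        | none =>
          have hget : ∀ x, PySem.Dict.get?
              ((path ++ [cur]).foldl (fun dd n => PySem.Dict.insert dd n cur) R) x
              = if x ∈ path ++ [cur] then some cur else PySem.Dict.get? R x :=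
            fun x => pv_get?_foldl_insert_fun (fun _ => cur) _ R x
          have hrescur : pvA_resolveRoot cur d = cur := pv_resolve_none d cur hstepc
          have hres : ∀ (t : Nat) (ht : t < path.length),
              pvA_resolveRoot (path[t]'ht) d = cur := by
            intro t ht
            have h1 := pv_resolve_reach d (path.length - t) _ cur (hreach t ht) ?_
            · rw [h1, hrescur]
            · intro s hs z hz
              have hzz := hzidx t s ht (by omega) z hz
              refine pv_not_onCycle_of_none d (T := (path.length - (t+s)) + 1) ?_
              rw [hzz, pv_iter_add d (path.length - (t+s)) 1 _, hreach (t+s) (by omega)]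
              simp [pvIter, hstepc]
          refine ⟨⟨?_, ?_, ?_⟩, ?_, ?_⟩
          · intro k v hv
            rw [hget k] at hv
            split_ifs at hv with hk
            · have hv' : v = cur := (Option.some_inj.mp hv).symm
              rcases List.mem_append.mp hk with h | h
              · obtain ⟨t, ht, rfl⟩ := List.mem_iff_getElem.mp h
                rw [hv']
                exact (hres t ht).symm
              · have : k = cur := by simpa using h
                subst this
                rw [hv']
                exact hrescur.symm
            · exact hI1 k v hv
          · intro k p hk hstep
            rw [hget p]
            rw [hget k] at hk
            split_ifs at hk with hkp
            · rcases List.mem_append.mp hkp with h | h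
              · obtain ⟨t, ht, rfl⟩ := List.mem_iff_getElem.mp h
                have hnext := hchainE t (by simp; omega)
                rw [hLget t ht, hstep] at hnext
                have hpmem : p ∈ path ++ [cur] :=
                  (Option.some_inj.mp hnext) ▸ List.getElem_mem (l := path ++ [cur]) (by simp; omega)
                rw [if_pos hpmem]
                rfl
              · have : k = cur := by simpa using h
                subst this
                rw [hstepc] at hstep
                cases hstep
            · have hold := hI2 k p hk hstep
              split_ifs with hp
              · rfl
              · exact hold
          · exact PySem.Dict.nodup_keys_foldl_insert _ (fun _ _ => cur) R hI3
          · intro x hx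
            rw [hget x]
            split_ifs
            · rfl
            · exact hx
          · intro x hx
            rw [hget x, if_pos hx]
            rfl

-- the whole memo table B builds: sound and total on the known ids
theorem pv_build_spec (d : PySem.Dict String (PySem.Dict String String))
    (parentD : PySem.Dict String String) (hpar : ∀ c, PySem.Dict.get? parentD c = pvStep d c) :
    ∀ (ks : List String) (R : PySem.Dict String String), pvInv d R →
      pvInv d (ks.foldl (fun root start =>
        match PySem.Dict.get? root start with
        | some _ => root
        | none => pvB_walkAux parentD (PySem.Dict.size d + 1) root [] (PySem.Dict.mk []) start) R) ∧
      (∀ x, (PySem.Dict.get? R x).isSome →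
        (PySem.Dict.get? (ks.foldl (fun root start =>
          match PySem.Dict.get? root start with
          | some _ => root
          | none => pvB_walkAux parentD (PySem.Dict.size d + 1) root [] (PySem.Dict.mk []) start) R) x).isSome) ∧
      (∀ k ∈ ks, (PySem.Dict.get? (ks.foldl (fun root start =>
        match PySem.Dict.get? root start with
        | some _ => root
        | none => pvB_walkAux parentD (PySem.Dict.size d + 1) root [] (PySem.Dict.mk []) start) R) k).isSome) := by
  intro ks
  induction ks with
  | nil =>
    intro R hInv
    exact ⟨hInv, fun x h => h, by simp⟩
  | cons k ks ih =>
    intro R hInv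
    simp only [List.foldl_cons]
    cases hk : PySem.Dict.get? R k with
    | some v =>
      obtain ⟨a, b, c⟩ := ih R hInv
      refine ⟨a, b, ?_⟩
      intro x hx
      rcases List.mem_cons.mp hx with rfl | hx'
      · exact b x (by rw [hk]; rfl)
      · exact c x hx'
    | none =>
      have hw := pv_walk_spec d parentD hpar (PySem.Dict.size d + 1) R [] (PySem.Dict.mk []) k hInv
        (by intro x; rfl)
        (by
          rw [List.nil_append]
          rw [List.isChain_iff_getElem]
          intro i hi
          simp at hi)
        List.nodup_nil
        (by intro x hx; cases hx)
        (by
          have h1 := pv_meas_nil d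
          have h2 := pv_size_eq d
          omega)
      obtain ⟨hInv', hmono', hcached'⟩ := hw
      obtain ⟨a, b, c⟩ := ih _ hInv'
      refine ⟨a, fun x hx => b x (hmono' x hx), ?_⟩
      intro x hx
      rcases List.mem_cons.mp hx with rfl | hx'
      · exact b x (hcached' x (by simp))
      · exact c x hx'

theorem pv_byid_nodup (enriched : List (List (String × String))) :
    (PySem.Dict.keys (pvById enriched)).Nodup := by
  unfold pvById
  suffices h : ∀ (l : List (List (String × String))) (acc : PySem.Dict String (PySem.Dict String String)),
      (PySem.Dict.keys acc).Nodup →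
      (PySem.Dict.keys (l.foldl (fun d m =>
        if PySem.Dict.contains (PySem.Dict.mk m) "id" then
          PySem.Dict.insert d ((PySem.Dict.get? (PySem.Dict.mk m) "id").getD "") (PySem.Dict.mk m)
        else d) acc)).Nodup by
    exact h enriched (PySem.Dict.mk []) (by simp [PySem.Dict.keys])
  intro l
  induction l with
  | nil => intro acc h; exact h
  | cons m l ih =>
    intro acc hacc
    simp only [List.foldl_cons]
    by_cases hc : PySem.Dict.contains (PySem.Dict.mk m) "id"
    · simp only [hc, if_true]
      exact ih _ (PySem.Dict.nodup_keys_insert _ _ _ hacc)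
    · simp only [Bool.not_eq_true] at hc
      simp only [hc, Bool.false_eq_true, if_false]
      exact ih _ hacc

theorem pv_byid_mem (enriched : List (List (String × String))) (m : List (String × String))
    (hm : m ∈ enriched) (mid : String) (hid : PySem.Dict.get? (PySem.Dict.mk m) "id" = some mid) :
    mid ∈ PySem.Dict.keys (pvById enriched) := by
  unfold pvById
  have hmono : ∀ (l : List (List (String × String))) (acc : PySem.Dict String (PySem.Dict String String)),
      mid ∈ PySem.Dict.keys acc →
      mid ∈ PySem.Dict.keys (l.foldl (fun d m =>
        if PySem.Dict.contains (PySem.Dict.mk m) "id" then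
          PySem.Dict.insert d ((PySem.Dict.get? (PySem.Dict.mk m) "id").getD "") (PySem.Dict.mk m)
        else d) acc) := by
    intro l
    induction l with
    | nil => intro acc h; exact h
    | cons m' l ih =>
      intro acc hacc
      simp only [List.foldl_cons]
      by_cases hc : PySem.Dict.contains (PySem.Dict.mk m') "id"
      · simp only [hc, if_true]
        exact ih _ ((PySem.Dict.mem_keys_insert _ _ _ _).mpr (Or.inr hacc))
      · simp only [Bool.not_eq_true] at hc
        simp only [hc, Bool.false_eq_true, if_false]
        exact ih _ hacc
  suffices h : ∀ (l : List (List (String × String))) (acc : PySem.Dict String (PySem.Dict String String)),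
      m ∈ l →
      mid ∈ PySem.Dict.keys (l.foldl (fun d m =>
        if PySem.Dict.contains (PySem.Dict.mk m) "id" then
          PySem.Dict.insert d ((PySem.Dict.get? (PySem.Dict.mk m) "id").getD "") (PySem.Dict.mk m)
        else d) acc) by
    exact h enriched (PySem.Dict.mk []) hm
  intro l
  induction l with
  | nil => intro acc h; cases h
  | cons m' l ih =>
    intro acc hml
    simp only [List.foldl_cons]
    rcases List.mem_cons.mp hml with rfl | hml'
    · have hc : PySem.Dict.contains (PySem.Dict.mk m) "id" = true := by
        rw [PySem.Dict.contains_eq_isSome_get?, hid]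
        rfl
      simp only [hc, if_true]
      refine hmono l _ ?_
      rw [hid]
      exact (PySem.Dict.mem_keys_insert _ _ _ _).mpr (Or.inl rfl)
    · by_cases hc : PySem.Dict.contains (PySem.Dict.mk m') "id"
      · simp only [hc, if_true]
        exact ih _ hml'
      · simp only [Bool.not_eq_true] at hc
        simp only [hc, Bool.false_eq_true, if_false]
        exact ih _ hml'

theorem pv_rt_skip (d : PySem.Dict String (PySem.Dict String String)) :
    ∀ (l : List (List (String × String))) (acc : PySem.Dict String String) (mid : String),
      (¬ ∃ m ∈ l, PySem.Dict.get? (PySem.Dict.mk m) "id" = some mid) →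
      PySem.Dict.get? (l.foldl (fun rt m =>
        match PySem.Dict.get? (PySem.Dict.mk m) "id" with
        | none => rt
        | some mid' =>
          let root := pvA_resolveRoot mid' d
          let topic0 :=
            match PySem.Dict.get? ((PySem.Dict.get? d root).getD (PySem.Dict.mk [])) "topic" with
            | some t => if t ≠ "" then t else "other"
            | none => "other"
          let topic := if PySem.Str.strip topic0 = "" || topic0 = "unknown" then "other" else topic0
          PySem.Dict.insert rt mid' topic) acc) mid = PySem.Dict.get? acc mid := by
  intro l
  induction l with
  | nil => intro acc mid _; rfl
  | cons m l ih =>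
    intro acc mid hno
    simp only [List.foldl_cons]
    have hno' : ¬ ∃ m' ∈ l, PySem.Dict.get? (PySem.Dict.mk m') "id" = some mid :=
      fun ⟨m', h', hh⟩ => hno ⟨m', List.mem_cons_of_mem _ h', hh⟩
    cases hid : PySem.Dict.get? (PySem.Dict.mk m) "id" with
    | none => exact ih acc mid hno'
    | some k =>
      have hk : k ≠ mid := fun e => hno ⟨m, List.mem_cons_self, by rw [hid, e]⟩
      rw [ih _ mid hno']
      show PySem.Dict.get? (PySem.Dict.insert acc k (pvTopicA d k)) mid = PySem.Dict.get? acc mid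
      rw [PySem.Dict.get?_insert, if_neg (fun e => hk e.symm)]

-- lookup in A's root_topic fold
theorem pv_rt_get (d : PySem.Dict String (PySem.Dict String String)) :
    ∀ (l : List (List (String × String))) (acc : PySem.Dict String String) (mid : String),
      (∀ x v, PySem.Dict.get? acc x = some v → v = pvTopicA d x) →
      ((∃ m ∈ l, PySem.Dict.get? (PySem.Dict.mk m) "id" = some mid) →
        PySem.Dict.get? (l.foldl (fun rt m =>
          match PySem.Dict.get? (PySem.Dict.mk m) "id" with
          | none => rt
          | some mid' =>
            let root := pvA_resolveRoot mid' d
            let topic0 :=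
              match PySem.Dict.get? ((PySem.Dict.get? d root).getD (PySem.Dict.mk [])) "topic" with
              | some t => if t ≠ "" then t else "other"
              | none => "other"
            let topic := if PySem.Str.strip topic0 = "" || topic0 = "unknown" then "other" else topic0
            PySem.Dict.insert rt mid' topic) acc) mid = some (pvTopicA d mid)) := by
  intro l
  induction l with
  | nil =>
    intro acc mid hacc hex
    exact absurd hex (by simp)
  | cons m l ih =>
    intro acc mid hacc hex
    simp only [List.foldl_cons]
    cases hid : PySem.Dict.get? (PySem.Dict.mk m) "id" with
    | none =>
      refine ih acc mid hacc ?_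
      rcases hex with ⟨m', hm', hid'⟩
      rcases List.mem_cons.mp hm' with rfl | h'
      · rw [hid] at hid'; cases hid'
      · exact ⟨m', h', hid'⟩
    | some mid' =>
      by_cases hwit : ∃ m' ∈ l, PySem.Dict.get? (PySem.Dict.mk m') "id" = some mid
      · refine ih _ mid ?_ hwit
        intro x v hv
        have hv' : PySem.Dict.get? (PySem.Dict.insert acc mid' (pvTopicA d mid')) x = some v := hv
        rw [PySem.Dict.get?_insert] at hv'
        split_ifs at hv' with hx
        · subst hx
          exact (Option.some_inj.mp hv').symm
        · exact hacc x v hv'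
      · have hmm : mid' = mid := by
          rcases hex with ⟨m', hm', hid'⟩
          rcases List.mem_cons.mp hm' with rfl | h'
          · rw [hid] at hid'
            exact Option.some_inj.mp hid'
          · exact absurd ⟨m', h', hid'⟩ hwit
        subst hmm
        rw [pv_rt_skip d l _ mid' hwit]
        show PySem.Dict.get? (PySem.Dict.insert acc mid' (pvTopicA d mid')) mid' = some (pvTopicA d mid')
        exact PySem.Dict.get?_insert_self _ _ _

theorem pv_tf_skip (d : PySem.Dict String (PySem.Dict String String)) :
    ∀ (l : List (String × String)) (acc : PySem.Dict String String) (mid : String),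
      mid ∉ l.map Prod.fst →
      PySem.Dict.get? (l.foldl (fun tf p =>
        let t0 :=
          match PySem.Dict.get? ((PySem.Dict.get? d p.2).getD (PySem.Dict.mk [])) "topic" with
          | some t => if t ≠ "" then t else "other"
          | none => "other"
        let t := if PySem.Str.strip t0 = "" || t0 = "unknown" then "other" else t0
        PySem.Dict.insert tf p.1 t) acc) mid = PySem.Dict.get? acc mid := by
  intro l
  induction l with
  | nil => intro acc mid _; rfl
  | cons p l ih =>
    intro acc mid hno
    simp only [List.map_cons, List.mem_cons, not_or] at hno
    simp only [List.foldl_cons]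
    rw [ih _ mid hno.2]
    rw [PySem.Dict.get?_insert, if_neg hno.1]

-- lookup in B's topic_of fold
theorem pv_tf_get (d : PySem.Dict String (PySem.Dict String String)) :
    ∀ (l : List (String × String)) (acc : PySem.Dict String String) (mid : String),
      (∀ p ∈ l, p.2 = pvA_resolveRoot p.1 d) →
      (∀ x v, PySem.Dict.get? acc x = some v → v = pvTopicA d x) →
      ((mid ∈ l.map Prod.fst) →
        PySem.Dict.get? (l.foldl (fun tf p =>
          let t0 :=
            match PySem.Dict.get? ((PySem.Dict.get? d p.2).getD (PySem.Dict.mk [])) "topic" with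
            | some t => if t ≠ "" then t else "other"
            | none => "other"
          let t := if PySem.Str.strip t0 = "" || t0 = "unknown" then "other" else t0
          PySem.Dict.insert tf p.1 t) acc) mid = some (pvTopicA d mid)) := by
  intro l
  induction l with
  | nil =>
    intro acc mid _ _ hmem
    simp at hmem
  | cons p l ih =>
    intro acc mid hvals hacc hmem
    obtain ⟨k, r⟩ := p
    have hr : r = pvA_resolveRoot k d := hvals (k, r) List.mem_cons_self
    subst hr
    simp only [List.foldl_cons]
    by_cases hml : mid ∈ l.map Prod.fst
    · refine ih _ mid (fun q hq => hvals q (List.mem_cons_of_mem _ hq)) ?_ hml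
      intro x v hv
      have hv' : PySem.Dict.get? (PySem.Dict.insert acc k (pvTopicA d k)) x = some v := hv
      rw [PySem.Dict.get?_insert] at hv'
      split_ifs at hv' with hx
      · subst hx
        exact (Option.some_inj.mp hv').symm
      · exact hacc x v hv'
    · have hmk : mid = k := by
        simp only [List.map_cons, List.mem_cons] at hmem
        rcases hmem with h | h
        · exact h
        · exact absurd h hml
      subst hmk
      rw [pv_tf_skip d l _ mid hml]
      show PySem.Dict.get? (PySem.Dict.insert acc mid (pvTopicA d mid)) mid = some (pvTopicA d mid)
      exact PySem.Dict.get?_insert_self _ _ _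

theorem pv_main (enriched : List (List (String × String))) :
    apply_root_topics_py enriched = apply_root_topics_py_alt enriched := by
  have e1 : apply_root_topics_py enriched = enriched.map (fun m =>
      match PySem.Dict.get? (PySem.Dict.mk m) "id" with
      | none => m
      | some mid =>
        match PySem.Dict.get? (pvRT enriched) mid with
        | none => m
        | some t => (PySem.Dict.insert (PySem.Dict.mk m) "topic" t).items) := rfl
  have e2 : apply_root_topics_py_alt enriched = enriched.map (fun m =>
      match PySem.Dict.get? (PySem.Dict.mk m) "id" with
      | none => m
      | some mid =>
        match PySem.Dict.get? (pvTF enriched) mid with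
        | none => m
        | some t => (PySem.Dict.insert (PySem.Dict.mk m) "topic" t).items) := rfl
  rw [e1, e2]
  have hnd := pv_byid_nodup enriched
  have hpar : ∀ c, PySem.Dict.get? (pvParentD enriched) c = pvStep (pvById enriched) c :=
    fun c => pv_parent_get? (pvById enriched) hnd c
  have hInv0 : pvInv (pvById enriched) (PySem.Dict.mk []) := by
    refine ⟨?_, ?_, ?_⟩
    · intro k v hv
      rw [pv_dict_get?_eq_find?] at hv
      simp at hv
    · intro k p hk _
      rw [pv_dict_get?_eq_find?] at hk
      simp at hk
    · simp [PySem.Dict.keys]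
  obtain ⟨hInvR, _hmonoR, hallR⟩ := pv_build_spec (pvById enriched) (pvParentD enriched) hpar
    (PySem.Dict.keys (pvById enriched)) (PySem.Dict.mk []) hInv0
  apply List.map_congr_left
  intro m hm
  show (match PySem.Dict.get? (PySem.Dict.mk m) "id" with
      | none => m
      | some mid =>
        match PySem.Dict.get? (pvRT enriched) mid with
        | none => m
        | some t => (PySem.Dict.insert (PySem.Dict.mk m) "topic" t).items)
    = (match PySem.Dict.get? (PySem.Dict.mk m) "id" with
      | none => m
      | some mid =>
        match PySem.Dict.get? (pvTF enriched) mid with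
        | none => m
        | some t => (PySem.Dict.insert (PySem.Dict.mk m) "topic" t).items)
  cases hid : PySem.Dict.get? (PySem.Dict.mk m) "id" with
  | none => rfl
  | some mid =>
    show (match PySem.Dict.get? (pvRT enriched) mid with
      | none => m
      | some t => (PySem.Dict.insert (PySem.Dict.mk m) "topic" t).items)
      = (match PySem.Dict.get? (pvTF enriched) mid with
      | none => m
      | some t => (PySem.Dict.insert (PySem.Dict.mk m) "topic" t).items)
    have hA : PySem.Dict.get? (pvRT enriched) mid = some (pvTopicA (pvById enriched) mid) := by
      refine pv_rt_get (pvById enriched) enriched (PySem.Dict.mk []) mid ?_ ⟨m, hm, hid⟩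
      intro x v hv
      rw [pv_dict_get?_eq_find?] at hv
      simp at hv
    have hkey : mid ∈ PySem.Dict.keys (pvRootD enriched) := by
      have h1 := pv_byid_mem enriched m hm mid hid
      have h2 : (PySem.Dict.get? (pvRootD enriched) mid).isSome := hallR mid h1
      by_contra hx
      rw [(PySem.Dict.get?_eq_none_iff_not_mem_keys _ mid).mpr hx] at h2
      simp at h2
    have hB : PySem.Dict.get? (pvTF enriched) mid = some (pvTopicA (pvById enriched) mid) := by
      refine pv_tf_get (pvById enriched) (PySem.Dict.items (pvRootD enriched)) (PySem.Dict.mk []) mid ?_ ?_ ?_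
      · intro p hp
        have hg := PySem.Dict.get?_of_mem_items (d := pvRootD enriched) (k := p.1) (v := p.2)
          (by exact hp) hInvR.2.2
        exact hInvR.1 p.1 p.2 hg
      · intro x v hv
        rw [pv_dict_get?_eq_find?] at hv
        simp at hv
      · exact hkey
    rw [hA, hB]

-- ===== VERDICT (by name: the statement is the Claim_ definition above) =====
theorem apply_root_topics_py_spec : Claim_equal_apply_root_topics_py := by
  intro enriched _hdom
  show apply_root_topics_py enriched = apply_root_topics_py_alt enriched
  exact pv_main enriched
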